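-- pv_equiv track=rewrite | github.com/DurandBastien/Search-Engine-LATimes | QueryMaker/queryShell.py | deleteDuplicatesInQuery
-- ===== SOURCE A (Python) =====
-- def deleteDuplicatesInQuery(queryWithScore):
-- 	"""
-- 	Delete duplicates in the query by summing the scores.
-- 	args:
-- 		queryWithScore: array of pairs of token and its score
-- 	"""
-- 	myWords = [token[0] for token in queryWithScore]
-- 	wordsWithoutDuplicates = []
-- 	for i in range(len(myWords)):
-- 		if myWords[i] not in myWords[:i]:
-- 			indices = [k for k in range(len(myWords)) if myWords[k]==myWords[i]]
-- 			myScore = 0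
-- 			for indice in indices:
-- 				myScore += queryWithScore[indice][1]
-- 			wordsWithoutDuplicates.append((myWords[i], myScore))
-- 	return wordsWithoutDuplicates
-- ===== SOURCE B (Python) =====
-- def deleteDuplicatesInQuery(queryWithScore):
--     sums = {}
--     for tok, sc in queryWithScore:
--         sums[tok] = sums.get(tok, 0) + sc
--     seen = set()
--     out = []
--     for tok, _ in queryWithScore:
--         if tok not in seen:
--             seen.add(tok)
--             out.append((tok, sums[tok]))
--     return out
-- ===== Notes on version B (the rewrite author's own statement) =====
-- stated objective: faster
-- what changed: Replaces A's per-first-occurrence rescan of the whole list (prefix membership test plus an index-filter pass summing scores) with one dict pass accumulating per-token sums followed by one seen-set pass emitting each token at its first occurrence.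
import Mathlib
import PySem

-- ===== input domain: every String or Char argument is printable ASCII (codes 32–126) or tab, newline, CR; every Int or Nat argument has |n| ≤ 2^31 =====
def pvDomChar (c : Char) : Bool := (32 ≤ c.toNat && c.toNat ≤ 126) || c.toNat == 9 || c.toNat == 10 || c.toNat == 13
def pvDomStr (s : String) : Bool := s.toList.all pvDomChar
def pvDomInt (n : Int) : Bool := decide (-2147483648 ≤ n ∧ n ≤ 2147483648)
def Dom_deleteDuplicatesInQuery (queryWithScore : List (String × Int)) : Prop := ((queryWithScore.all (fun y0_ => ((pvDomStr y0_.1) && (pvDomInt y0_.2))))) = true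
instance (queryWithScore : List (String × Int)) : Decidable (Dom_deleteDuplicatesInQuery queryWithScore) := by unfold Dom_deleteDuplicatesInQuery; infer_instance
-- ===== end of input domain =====

-- B replaces A's quadratic per-token rescans with one sum-accumulating dict pass and one seen-set emission pass (faster: asymptotic, O(n^2) -> O(n)).

-- ===== PORT A =====
-- Every index taken from range(len …) is in range, so xs[i] is List.getD i and
-- myWords[:i] (0 ≤ i) is List.take i — exact here.
def deleteDuplicatesInQuery (queryWithScore : List (String × Int)) : List (String × Int) :=
  let myWords := queryWithScore.map (fun token => token.1)
  (List.range myWords.length).foldl (fun wordsWithoutDuplicates i =>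
    if ¬ (myWords.getD i "") ∈ (myWords.take i) then
      let indices := (List.range myWords.length).filter (fun k => myWords.getD k "" == myWords.getD i "")
      let myScore := indices.foldl (fun myScore indice => myScore + (queryWithScore.getD indice ("", 0)).2) 0
      wordsWithoutDuplicates ++ [(myWords.getD i "", myScore)]
    else wordsWithoutDuplicates) []

-- ===== PORT B =====
def deleteDuplicatesInQuery_alt (queryWithScore : List (String × Int)) : List (String × Int) :=
  let sums : PySem.Dict String Int :=
    queryWithScore.foldl (fun sums p => sums.insert p.1 (sums.getD p.1 0 + p.2)) PySem.Dict.empty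
  (queryWithScore.foldl
    (fun (st : List (String × Int) × PySem.Set String) p =>
      if PySem.Set.contains st.2 p.1 then st
      else (st.1 ++ [(p.1, sums.getD p.1 0)], PySem.Set.add st.2 p.1))
    ([], PySem.Set.empty)).1

-- ===== PRECONDITION & SPEC =====
def Spec_deleteDuplicatesInQuery (queryWithScore : List (String × Int)) (out : List (String × Int)) : Prop := out = deleteDuplicatesInQuery_alt queryWithScore
instance (queryWithScore : List (String × Int)) (out : List (String × Int)) : Decidable (Spec_deleteDuplicatesInQuery queryWithScore out) := by unfold Spec_deleteDuplicatesInQuery; infer_instance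

-- ===== CLAIM (what is proved, stated in full; the proofs are below) =====
def Claim_equal_deleteDuplicatesInQuery : Prop := ∀ (queryWithScore : List (String × Int)), Dom_deleteDuplicatesInQuery queryWithScore → Spec_deleteDuplicatesInQuery queryWithScore (deleteDuplicatesInQuery queryWithScore)

-- ===== LEMMAS AND PROOFS =====

-- total score of token t in qs
def pvScore (qs : List (String × Int)) (t : String) : Int :=
  ((qs.filter (fun p => p.1 == t)).map (fun p => p.2)).sum

-- first occurrences of tokens not yet seen, in order
def pvDedup : List String → List String → List String
  | [], _ => []
  | w :: ws, seen => if w ∈ seen then pvDedup ws seen else w :: pvDedup ws (seen ++ [w])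

-- the common normal form both programs compute
def pvCanon (qs : List (String × Int)) : List (String × Int) :=
  (pvDedup (qs.map (fun p => p.1)) []).map (fun t => (t, pvScore qs t))

theorem pvSums_getD (qs : List (String × Int)) (d : PySem.Dict String Int) (t : String) :
    (qs.foldl (fun d p => d.insert p.1 (d.getD p.1 0 + p.2)) d).getD t 0
      = d.getD t 0 + pvScore qs t := by
  induction qs generalizing d with
  | nil => simp [pvScore]
  | cons p ps ih =>
    simp only [List.foldl_cons, ih, PySem.Dict.getD_insert, pvScore, List.filter_cons]
    by_cases h : t = p.1
    · simp [h, List.map_cons, List.sum_cons]; ring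
    · have : (p.1 == t) = false := by simp [Ne.symm h]
      simp [h, this]

theorem pvPass2 (f : String → Int) (qs : List (String × Int))
    (out : List (String × Int)) (seen : List String) :
    (qs.foldl
      (fun (st : List (String × Int) × List String) p =>
        if p.1 ∈ st.2 then st else (st.1 ++ [(p.1, f p.1)], st.2 ++ [p.1]))
      (out, seen)).1
      = out ++ (pvDedup (qs.map (fun p => p.1)) seen).map (fun t => (t, f t)) := by
  induction qs generalizing out seen with
  | nil => simp [pvDedup]
  | cons p ps ih =>
    by_cases h : p.1 ∈ seen
    · simp [pvDedup, h, ih]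
    · simp [pvDedup, h, ih]

theorem pvAltCanon (qs : List (String × Int)) :
    deleteDuplicatesInQuery_alt qs = pvCanon qs := by
  show (qs.foldl
      (fun (st : List (String × Int) × PySem.Set String) p =>
        if PySem.Set.contains st.2 p.1 then st
        else (st.1 ++ [(p.1,
          (qs.foldl (fun sums p => sums.insert p.1 (sums.getD p.1 0 + p.2))
            PySem.Dict.empty).getD p.1 0)], PySem.Set.add st.2 p.1))
      ([], PySem.Set.empty)).1 = pvCanon qs
  have hfun : (fun (st : List (String × Int) × PySem.Set String) (p : String × Int) =>
        if PySem.Set.contains st.2 p.1 then st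
        else (st.1 ++ [(p.1,
          (qs.foldl (fun sums p => sums.insert p.1 (sums.getD p.1 0 + p.2))
            PySem.Dict.empty).getD p.1 0)], PySem.Set.add st.2 p.1))
      = (fun (st : List (String × Int) × List String) p =>
        if p.1 ∈ st.2 then st
        else (st.1 ++ [(p.1,
          (qs.foldl (fun sums p => sums.insert p.1 (sums.getD p.1 0 + p.2))
            PySem.Dict.empty).getD p.1 0)], st.2 ++ [p.1])) := by
    funext st p
    by_cases h : p.1 ∈ st.2
    · rw [if_pos ((PySem.Set.contains_iff st.2 p.1).mpr h), if_pos h]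
    · rw [if_neg (fun hc => h ((PySem.Set.contains_iff st.2 p.1).mp hc)), if_neg h,
        PySem.Set.add_of_not_mem h]
  rw [hfun, pvPass2 (fun t =>
    (qs.foldl (fun sums p => sums.insert p.1 (sums.getD p.1 0 + p.2))
      PySem.Dict.empty).getD t 0) qs [] PySem.Set.empty]
  unfold pvCanon
  simp only [List.nil_append]
  have hseen : (PySem.Set.empty : List String) = [] := rfl
  rw [hseen]
  congr 1
  funext t
  rw [pvSums_getD qs PySem.Dict.empty t, PySem.Dict.getD_empty, zero_add]

-- A-side: the index-filtered score sum over a range equals pvScore of the prefix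
theorem pvScoreIdx (qs : List (String × Int)) (t : String) (n : ℕ) (hn : n ≤ qs.length) :
    (((List.range n).filter (fun k => (qs.map (fun p => p.1)).getD k "" == t)).foldl
      (fun s k => s + (qs.getD k ("", 0)).2) 0)
      = pvScore (qs.take n) t := by
  induction n with
  | zero => simp [pvScore]
  | succ m ih =>
    have hm : m < qs.length := hn
    have hw : (qs.map (fun p => p.1)).getD m "" = qs[m].1 := by
      simp [List.getD_eq_getElem?_getD, hm]
    have ht : qs.take (m + 1) = qs.take m ++ [qs[m]] := by
      rw [List.take_add_one]; simp [List.getElem?_eq_getElem hm]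
    have hg : qs.getD m ("", 0) = qs[m] := by
      simp [List.getD_eq_getElem?_getD, hm]
    rw [List.range_succ, List.filter_append, List.foldl_append, ih (Nat.le_of_lt hm)]
    by_cases h : (qs[m].1 == t)
    · have hp : ((qs.map (fun p => p.1)).getD m "" == t) = true := by rw [hw]; exact h
      have hf : List.filter (fun k => (qs.map (fun p => p.1)).getD k "" == t) [m] = [m] := by
        simp only [List.filter_cons, List.filter_nil, hp]; rfl
      rw [hf, ht]
      simp only [List.foldl_cons, List.foldl_nil, hg, pvScore, List.filter_append,
        List.map_append, List.sum_append, List.filter_cons, List.filter_nil, h,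
        if_true, List.map_cons, List.map_nil, List.sum_cons,
        List.sum_nil]
      ring
    · have hb : (qs[m].1 == t) = false := by simpa using h
      have hp : ((qs.map (fun p => p.1)).getD m "" == t) = false := by rw [hw]; exact hb
      have hf : List.filter (fun k => (qs.map (fun p => p.1)).getD k "" == t) [m] = [] := by
        simp only [List.filter_cons, List.filter_nil, hp]; rfl
      rw [hf, ht]
      simp only [List.foldl_nil, pvScore, List.filter_append, List.map_append,
        List.sum_append, List.filter_cons, List.filter_nil, hb, Bool.false_eq_true,
        if_false, List.map_nil, List.sum_nil]
      ring

-- pvDedup of a snoc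
theorem pvDedup_append (xs : List String) (seen : List String) (w : String) :
    pvDedup (xs ++ [w]) seen
      = pvDedup xs seen ++ (if w ∈ seen ∨ w ∈ xs then [] else [w]) := by
  induction xs generalizing seen with
  | nil => by_cases h : w ∈ seen <;> simp [pvDedup, h]
  | cons x xs ih =>
    simp only [List.cons_append, pvDedup]
    by_cases hx : x ∈ seen
    · rw [if_pos hx, if_pos hx, ih seen]
      have hiff : (w ∈ seen ∨ w ∈ xs) ↔ (w ∈ seen ∨ w ∈ x :: xs) := by
        simp only [List.mem_cons]
        constructor
        · rintro (h | h)
          · exact Or.inl h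
          · exact Or.inr (Or.inr h)
        · rintro (h | h | h)
          · exact Or.inl h
          · exact Or.inl (h ▸ hx)
          · exact Or.inr h
      simp only [hiff]
    · rw [if_neg hx, if_neg hx, ih (seen ++ [x]), List.cons_append]
      have hiff : (w ∈ seen ++ [x] ∨ w ∈ xs) ↔ (w ∈ seen ∨ w ∈ x :: xs) := by
        simp only [List.mem_append, List.mem_cons]
        tauto
      simp only [hiff]

-- A equals the normal form
theorem pvACanon (qs : List (String × Int)) :
    deleteDuplicatesInQuery qs = pvCanon qs := by
  suffices h : ∀ n, n ≤ (qs.map (fun p => p.1)).length →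
      (List.range n).foldl (fun acc i =>
        if ¬ ((qs.map (fun p => p.1)).getD i "") ∈ ((qs.map (fun p => p.1)).take i) then
          acc ++ [((qs.map (fun p => p.1)).getD i "",
            ((List.range (qs.map (fun p => p.1)).length).filter
              (fun k => (qs.map (fun p => p.1)).getD k "" == (qs.map (fun p => p.1)).getD i "")).foldl
              (fun s k => s + (qs.getD k ("", 0)).2) 0)]
        else acc) []
        = (pvDedup ((qs.map (fun p => p.1)).take n) []).map
            (fun t => (t, pvScore qs t)) by
    have h2 := h (qs.map (fun p => p.1)).length le_rfl
    rw [List.take_length] at h2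
    exact h2
  intro n hn
  induction n with
  | zero => simp [pvDedup]
  | succ m ih =>
    have hm' : m < (qs.map (fun p => p.1)).length := hn
    have hm : m < qs.length := by simpa using hm'
    have hw : (qs.map (fun p => p.1)).getD m "" = qs[m].1 := by
      simp [List.getD_eq_getElem?_getD, hm]
    have htake : (qs.map (fun p => p.1)).take (m + 1)
        = (qs.map (fun p => p.1)).take m ++ [qs[m].1] := by
      rw [List.take_add_one]
      simp [List.getElem?_eq_getElem, hm]
    have hscore : ((List.range (qs.map (fun p => p.1)).length).filter
        (fun k => (qs.map (fun p => p.1)).getD k "" == qs[m].1)).foldl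
        (fun s k => s + (qs.getD k ("", 0)).2) 0 = pvScore qs qs[m].1 := by
      have h1 := pvScoreIdx qs qs[m].1 (qs.map (fun p => p.1)).length (by simp)
      rwa [List.take_of_length_le (by simp)] at h1
    rw [List.range_succ, List.foldl_append, ih (Nat.le_of_lt hm'), htake, pvDedup_append]
    simp only [List.foldl_cons, List.foldl_nil, hw, hscore]
    by_cases h : qs[m].1 ∈ (qs.map (fun p => p.1)).take m
    · simp [h]
    · simp [h]

-- ===== VERDICT (by name: the statement is the Claim_ definition above) =====
theorem deleteDuplicatesInQuery_spec : Claim_equal_deleteDuplicatesInQuery := by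
  intro qs _
  show deleteDuplicatesInQuery qs = deleteDuplicatesInQuery_alt qs
  rw [pvACanon, pvAltCanon]
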